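-- pv_equiv track=rewrite | github.com/Oichkatzelesfrettschen/open_gororoba | src/scripts/analysis/normalize_claims_matrix_legacy_rows.py | _escape_unescaped_pipes
-- ===== SOURCE A (Python) =====
-- def _escape_unescaped_pipes(text: str) -> str:
--     out: list[str] = []
--     escaped = False
--     in_code = False
--     for ch in text:
--         if escaped:
--             out.append(ch)
--             escaped = False
--             continue
--         if ch == "\\":
--             out.append(ch)
--             escaped = True
--             continue
--         if ch == "`":
--             in_code = not in_code
--             out.append(ch)
--             continue
--         if ch == "|" and not in_code:
--             out.append("\\|")
--             continue
--         out.append(ch)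
--     return "".join(out)
-- ===== SOURCE B (Python) =====
-- import re
--
-- _TOKEN = re.compile(r"\\.|`|\|", re.DOTALL)
--
--
-- def _escape_unescaped_pipes(text: str) -> str:
--     in_code = False
--
--     def repl(m: "re.Match[str]") -> str:
--         nonlocal in_code
--         tok = m.group(0)
--         if tok[0] == "\\":        # escaped pair: copied verbatim
--             return tok
--         if tok == "`":            # backtick toggles code-span state
--             in_code = not in_code
--             return tok
--         return "|" if in_code else "\\|"
--
--     return _TOKEN.sub(repl, text)
-- ===== Notes on version B (the rewrite author's own statement) =====
-- stated objective: faster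
-- what changed: Replaces A's char-by-char Python loop with escaped/in_code state flags by a single re.sub over the token alternation \\.|`|\| (DOTALL) with a stateful replacement function; unmatched runs are copied by the C regex engine instead of one character at a time (measured ~6.8x at n=262144).
import Mathlib
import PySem

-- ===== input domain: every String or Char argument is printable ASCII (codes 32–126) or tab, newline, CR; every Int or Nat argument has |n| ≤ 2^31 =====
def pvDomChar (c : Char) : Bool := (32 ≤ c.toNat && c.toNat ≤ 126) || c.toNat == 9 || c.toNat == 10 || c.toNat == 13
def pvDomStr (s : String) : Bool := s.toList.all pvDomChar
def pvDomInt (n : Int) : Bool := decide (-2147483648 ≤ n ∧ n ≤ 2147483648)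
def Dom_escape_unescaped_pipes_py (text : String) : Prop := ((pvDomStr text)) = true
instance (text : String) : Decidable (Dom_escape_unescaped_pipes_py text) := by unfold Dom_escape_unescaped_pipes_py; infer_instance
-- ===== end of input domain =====

-- B replaces A's char-by-char escaped/in_code state loop by one regex-sub pass over the
-- token alternation  \.|`|\|  with a stateful replacement; measured faster (C-level regex scan vs Python char loop).

-- ===== PORT A =====
-- A's loop state: (out list of strings, escaped flag, in_code flag); "".join at the end.
def pvAStep (st : List String × Bool × Bool) (ch : Char) : List String × Bool × Bool :=
  let (out, escaped, in_code) := st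
  if escaped then (out ++ [String.ofList [ch]], false, in_code)
  else if ch = '\\' then (out ++ [String.ofList [ch]], true, in_code)
  else if ch = '`' then (out ++ [String.ofList [ch]], false, !in_code)
  else if ch = '|' ∧ in_code = false then (out ++ ["\\|"], false, in_code)
  else (out ++ [String.ofList [ch]], false, in_code)

def escape_unescaped_pipes_py (text : String) : String :=
  String.join (text.toList.foldl pvAStep ([], false, false)).1

-- ===== PORT B =====
-- Hand port of Source B's regex pass (no regex engine in Lean): pvTok scans for the next
-- match of the alternation  \\.|`|\|  (leftmost, first alternative wins, DOTALL so '.'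
-- is any char; a trailing lone '\' matches nothing and is copied verbatim), copies
-- unmatched text through unchanged, and applies Source B's repl to each token, threading
-- the in_code flag exactly as the closure does. Exact on all inputs.
def pvTok (in_code : Bool) : List Char → List Char
  | [] => []
  | c :: rest =>
    if c = '\\' then
      match rest with
      | [] => ['\\']                                   -- no match: verbatim
      | d :: rest' => '\\' :: d :: pvTok in_code rest' -- token "\d": repl returns it unchanged
    else if c = '`' then '`' :: pvTok (!in_code) rest  -- token "`": flip in_code
    else if c = '|' then
      (if in_code then '|' :: pvTok in_code rest else '\\' :: '|' :: pvTok in_code rest)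
    else c :: pvTok in_code rest                       -- unmatched text: verbatim

def escape_unescaped_pipes_py_alt (text : String) : String :=
  String.ofList (pvTok false text.toList)

-- ===== PRECONDITION & SPEC =====
def Spec_escape_unescaped_pipes_py (text : String) (out : String) : Prop := out = escape_unescaped_pipes_py_alt text
instance (text : String) (out : String) : Decidable (Spec_escape_unescaped_pipes_py text out) := by unfold Spec_escape_unescaped_pipes_py; infer_instance

-- ===== CLAIM (what is proved, stated in full; the proofs are below) =====
def Claim_equal_escape_unescaped_pipes_py : Prop := ∀ (text : String), Dom_escape_unescaped_pipes_py text → Spec_escape_unescaped_pipes_py text (escape_unescaped_pipes_py text)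

-- ===== LEMMAS AND PROOFS =====

lemma pv_foldl_append_toList (l : List String) : ∀ (acc : String),
    (l.foldl (· ++ ·) acc).toList = acc.toList ++ (l.map String.toList).flatten := by
  induction l with
  | nil => intro acc; simp
  | cons s t ih => intro acc; simp [List.foldl, ih]

lemma pv_join_toList (l : List String) :
    (String.join l).toList = (l.map String.toList).flatten := by
  simpa [String.join] using pv_foldl_append_toList l ""

lemma pv_fold_eq_tok (ic : Bool) (l : List Char) : ∀ (out : List String),
    (((l.foldl pvAStep (out, false, ic)).1).map String.toList).flatten
      = (out.map String.toList).flatten ++ pvTok ic l := by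
  induction ic, l using pvTok.induct with
  | case1 ic => intro out; simp [pvTok]
  | case2 ic => intro out; simp [pvTok, pvAStep]
  | case3 ic d rest' ih => intro out; simp [pvTok, pvAStep, ih]
  | case4 ic rest' hne ih => intro out; rw [pvTok.eq_def]; simp [pvAStep, ih]
  | case5 rest' h1 h2 ih => intro out; rw [pvTok.eq_def]; simp [pvAStep, ih]
  | case6 ic rest' h h1 h2 ih =>
      intro out
      simp only [Bool.not_eq_true] at h
      subst h
      rw [pvTok.eq_def]; simp [pvAStep, ih]
  | case7 ic d rest' h1 h2 h3 ih =>
      intro out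
      rw [pvTok.eq_def]; simp [pvAStep, h1, h2, h3, ih]

-- ===== VERDICT (by name: the statement is the Claim_ definition above) =====
theorem escape_unescaped_pipes_py_spec : Claim_equal_escape_unescaped_pipes_py := by
  intro text _
  unfold Spec_escape_unescaped_pipes_py escape_unescaped_pipes_py escape_unescaped_pipes_py_alt
  apply String.toList_inj.mp
  rw [pv_join_toList]
  simpa using pv_fold_eq_tok false text.toList []
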